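-- pv_equiv track=rewrite | github.com/whitemagic-ai/whitemagic-clean | modular/max/python/max/_tensor_repr.py | _join_horizontal
-- ===== SOURCE A (Python) =====
-- def _join_horizontal(blocks: list[str], sep: str = "") -> str:
--     """Join blocks horizontally side-by-side.
--
--     Args:
--         blocks: List of multi-line block strings.
--         sep: Separator character(s) between blocks.
--
--     Returns:
--         Horizontally joined string.
--     """
--     if not blocks:
--         return ""
--
--     lines_per_block = [b.split("\n") for b in blocks]
--     max_height = max(len(lines) for lines in lines_per_block)
--     widths = [
--         max((len(line) for line in lines), default=0)
--         for lines in lines_per_block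
--     ]
--
--     # Pad each block to have the same height
--     def pad_block(lines: list[str], width: int) -> list[str]:
--         return [
--             lines[i].ljust(width) if i < len(lines) else " " * width
--             for i in range(max_height)
--         ]
--
--     padded = [
--         pad_block(lines, width)
--         for lines, width in zip(lines_per_block, widths, strict=True)
--     ]
--
--     joiner = f" {sep} " if sep else " "
--     return "\n".join(
--         joiner.join(block[i] for block in padded) for i in range(max_height)
--     )
-- ===== SOURCE B (Python) =====
-- def _join_horizontal(blocks: list[str], sep: str = "") -> str:
--     """Join blocks horizontally by a single left-to-right fold over blocks:
--     each block appends one cell chunk to every accumulated row (rows kept as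
--     part lists, concatenated once at the end), with a running blank-row
--     template used to extend the accumulator where a block is taller."""
--     if not blocks:
--         return ""
--     joiner = f" {sep} " if sep else " "
--     rows = None
--     blank = []
--     for b in blocks:
--         lines = b.split("\n")
--         w = max(map(len, lines), default=0)
--         if rows is None:
--             rows, pre = [], ""
--         else:
--             pre = joiner
--         rows = rows + [blank[:] for _ in range(len(lines) - len(rows))]
--         for i, r in enumerate(rows):
--             r.append(pre + (lines[i] if i < len(lines) else "").ljust(w))
--         blank.append(pre + " " * w)
--     return "\n".join("".join(r) for r in rows)
-- ===== Notes on version B (the rewrite author's own statement) =====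
-- stated objective: alternative
-- what changed: B is a single left-to-right fold over blocks that stitches each block onto an accumulator of per-row part lists (extended by a running blank-row template, concatenated once at the end), instead of A's two-phase row-major scheme that precomputes max_height and widths, materializes every block padded via pad_block, and then joins the padded matrix by row index.
import Mathlib
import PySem

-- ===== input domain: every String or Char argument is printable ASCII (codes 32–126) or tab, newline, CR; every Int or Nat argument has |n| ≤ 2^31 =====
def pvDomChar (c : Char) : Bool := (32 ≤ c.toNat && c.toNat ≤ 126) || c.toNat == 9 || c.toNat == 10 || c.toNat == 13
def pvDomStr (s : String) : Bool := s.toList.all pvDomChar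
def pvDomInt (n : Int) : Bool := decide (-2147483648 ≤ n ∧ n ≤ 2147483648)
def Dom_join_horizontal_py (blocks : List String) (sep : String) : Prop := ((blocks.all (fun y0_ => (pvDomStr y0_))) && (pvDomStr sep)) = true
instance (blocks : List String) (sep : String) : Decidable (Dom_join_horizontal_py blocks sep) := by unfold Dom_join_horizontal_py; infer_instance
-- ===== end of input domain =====

-- B replaces A's two-phase row-major scheme (max_height, widths, pad_block, join by row
-- index) with a single left-to-right fold over blocks stitching each block onto an
-- accumulator of partial rows, extended by a running blank-row template (objective: alternative).

-- shared helper: Python's s.ljust(w) for ASCII lines (exact: pads with spaces, never truncates)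
def pvLjust (s : List Char) (w : Nat) : List Char := s ++ List.replicate (w - s.length) ' '

-- ===== PORT A =====
-- literal transliteration of _join_horizontal (Source A): split, max_height, widths,
-- pad_block materializing each block to max_height rows, then join by row index.
def join_horizontal_py (blocks : List String) (sep : String) : String :=
  if blocks.isEmpty then "" else
    let lines_per_block := blocks.map (fun b => PySem.Chars.splitOn b.toList ['\n'])
    let max_height := (lines_per_block.map List.length).foldl Nat.max 0
    let widths := lines_per_block.map (fun lines => (lines.map List.length).foldl Nat.max 0)
    -- pad_block lines width = [lines[i].ljust(width) if i < len(lines) else " "*width for i in range(max_height)]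
    let padded := (lines_per_block.zip widths).map (fun p =>
      (List.range max_height).map (fun i =>
        if h : i < p.1.length then pvLjust p.1[i] p.2 else List.replicate p.2 ' '))
    let joiner := if sep.toList = [] then [' '] else ' ' :: (sep.toList ++ [' '])
    -- block[i] with i < max_height = len(block): getD is exact here
    String.mk (PySem.Chars.join ['\n']
      ((List.range max_height).map (fun i =>
        PySem.Chars.join joiner (padded.map (fun block => block.getD i [])))))

-- ===== PORT B =====
-- one fold step (the loop body of Source B): extend the accumulated rows with copies of the
-- blank template where this block is taller, append this block's (ljust-padded) cell as
-- one more part of every row, and grow the blank template.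
-- State = (rows : Option of part-lists, blank parts); rows = none ↔ first block.
def pvStep (joiner : List Char) (st : Option (List (List (List Char))) × List (List Char))
    (lines : List (List Char)) : Option (List (List (List Char))) × List (List Char) :=
  let w := (lines.map List.length).foldl Nat.max 0
  let rp : List (List (List Char)) × List Char :=
    match st.1 with
    | none => ([], [])
    | some rs => (rs, joiner)
  let rows1 := rp.1 ++ List.replicate (lines.length - rp.1.length) st.2
  let rows2 := rows1.mapIdx (fun i r =>
    r ++ [rp.2 ++ pvLjust (if h : i < lines.length then lines[i] else []) w])
  (some rows2, st.2 ++ [rp.2 ++ List.replicate w ' '])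

def join_horizontal_py_alt (blocks : List String) (sep : String) : String :=
  if blocks.isEmpty then "" else
    let joiner := if sep.toList = [] then [' '] else ' ' :: (sep.toList ++ [' '])
    let st := blocks.foldl
      (fun st b => pvStep joiner st (PySem.Chars.splitOn b.toList ['\n'])) (none, [])
    String.mk (PySem.Chars.join ['\n'] ((st.1.getD []).map List.flatten))

-- ===== PRECONDITION & SPEC =====
def Spec_join_horizontal_py (blocks : List String) (sep : String) (out : String) : Prop := out = join_horizontal_py_alt blocks sep
instance (blocks : List String) (sep : String) (out : String) : Decidable (Spec_join_horizontal_py blocks sep out) := by unfold Spec_join_horizontal_py; infer_instance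

-- ===== CLAIM (what is proved, stated in full; the proofs are below) =====
def Claim_equal_join_horizontal_py : Prop := ∀ (blocks : List String) (sep : String), Dom_join_horizontal_py blocks sep → Spec_join_horizontal_py blocks sep (join_horizontal_py blocks sep)

-- ===== LEMMAS AND PROOFS =====

-- width of a block and its padded cell at row i (the value both programs place there)
def pvW (ls : List (List Char)) : Nat := (ls.map List.length).foldl Nat.max 0

def pvCell (ls : List (List Char)) (i : Nat) : List Char :=
  if h : i < ls.length then pvLjust ls[i] (pvW ls) else List.replicate (pvW ls) ' '

-- one full output row over a prefix of blocks, and the all-blank row over that prefix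
def pvRow (joiner : List Char) (cs : List (List (List Char))) (i : Nat) : List Char :=
  PySem.Chars.join joiner (cs.map (fun ls => pvCell ls i))

def pvBlank (joiner : List Char) (cs : List (List (List Char))) : List Char :=
  PySem.Chars.join joiner (cs.map (fun ls => List.replicate (pvW ls) ' '))

def pvH (cs : List (List (List Char))) : Nat := (cs.map List.length).foldl Nat.max 0

theorem pv_lt_foldl_max (l : List Nat) (a i : Nat) :
    i < l.foldl Nat.max a ↔ i < a ∨ ∃ x ∈ l, i < x := by
  induction l generalizing a with
  | nil => simp
  | cons y t ih =>
    simp only [List.foldl_cons, ih, List.mem_cons]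
    constructor
    · rintro (h | h)
      · rcases lt_max_iff.mp h with h | h
        · exact Or.inl h
        · exact Or.inr ⟨y, Or.inl rfl, h⟩
      · rcases h with ⟨x, hx, hix⟩; exact Or.inr ⟨x, Or.inr hx, hix⟩
    · rintro (h | ⟨x, hx | hx, hix⟩)
      · exact Or.inl (lt_max_iff.mpr (Or.inl h))
      · exact Or.inl (lt_max_iff.mpr (Or.inr (hx ▸ hix)))
      · exact Or.inr ⟨x, hx, hix⟩

theorem pvH_append (cs : List (List (List Char))) (c : List (List Char)) :
    pvH (cs ++ [c]) = Nat.max (pvH cs) c.length := by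
  simp [pvH, List.foldl_append]

theorem pv_len_le_H {cs : List (List (List Char))} {ls : List (List Char)}
    (h : ls ∈ cs) : ls.length ≤ pvH cs := by
  by_contra hlt
  have : pvH cs < ls.length := by omega
  have := (pv_lt_foldl_max (cs.map List.length) 0 (pvH cs)).mpr
    (Or.inr ⟨ls.length, List.mem_map_of_mem h, this⟩)
  exact absurd this (lt_irrefl _)

theorem pv_zip_map_self {A B : Type} (l : List A) (f : A -> B) :
    l.zip (l.map f) = l.map (fun a => (a, f a)) := by
  induction l with
  | nil => simp
  | cons a t ih => simp [ih]

-- join over an appended singleton, for a nonempty prefix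
theorem pv_join_append (sep : List Char) (xs : List (List Char)) (y : List Char)
    (h : xs ≠ []) :
    PySem.Chars.join sep (xs ++ [y]) = PySem.Chars.join sep xs ++ sep ++ y := by
  induction xs with
  | nil => exact absurd rfl h
  | cons a t ih =>
    cases t with
    | nil => simp [PySem.Chars.join_singleton, PySem.Chars.join_cons_cons]
    | cons b t' =>
      have hih := ih (by simp)
      simp only [List.cons_append] at hih ⊢
      rw [PySem.Chars.join_cons_cons, hih, PySem.Chars.join_cons_cons]
      simp

-- beyond a prefix's height every cell is blank, so the row is the blank template
theorem pvRow_ge_H (joiner : List Char) (cs : List (List (List Char))) (i : Nat)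
    (h : pvH cs ≤ i) : pvRow joiner cs i = pvBlank joiner cs := by
  unfold pvRow pvBlank
  congr 1
  apply List.map_congr_left
  intro ls hls
  have : ¬ i < ls.length := by have := pv_len_le_H hls; omega
  simp [pvCell, this]

theorem pvRow_append (joiner : List Char) (cs : List (List (List Char)))
    (c : List (List Char)) (i : Nat) (h : cs ≠ []) :
    pvRow joiner (cs ++ [c]) i = pvRow joiner cs i ++ joiner ++ pvCell c i := by
  unfold pvRow
  rw [List.map_append, List.map_singleton,
    pv_join_append _ _ _ (by simpa using h)]

theorem pv_add_sub_max (a b : Nat) : a + (b - a) = Nat.max a b := by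
  show a + (b - a) = max a b
  rw [Nat.max_def]; split <;> omega

-- the fold invariant: after a nonempty prefix cs the accumulated part-lists concatenate
-- to the cs-rows for every index below pvH cs, and the blank parts to the blank template
theorem pvFold_inv (joiner : List Char) (cs : List (List (List Char))) (h : cs ≠ []) :
    ∃ R Bl, cs.foldl (pvStep joiner) (none, []) = (some R, Bl) ∧
      R.map List.flatten = (List.range (pvH cs)).map (pvRow joiner cs) ∧
      Bl.flatten = pvBlank joiner cs := by
  induction cs using List.reverseRecOn with
  | nil => exact absurd rfl h
  | append_singleton cs c ih =>
    rw [List.foldl_append, List.foldl_cons, List.foldl_nil]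
    by_cases hcs : cs = []
    · subst hcs
      simp only [List.foldl_nil, pvStep, List.nil_append]
      refine ⟨_, _, rfl, ?_, ?_⟩
      · apply List.ext_getElem
        · simp [pvH]
        · intro i h1 h2
          have hi : i < c.length := by simpa using h1
          simp only [List.getElem_map, List.getElem_mapIdx, List.getElem_range,
            List.getElem_replicate]
          simp [pvCell, hi, pvRow, PySem.Chars.join_singleton, pvW]
      · simp [pvBlank, pvW, PySem.Chars.join_singleton]
    · obtain ⟨R, Bl, heq, hR, hBl⟩ := ih hcs
      rw [heq]
      have hRlen : R.length = pvH cs := by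
        have := congrArg List.length hR
        simpa using this
      have hadd : pvH cs + (c.length - pvH cs) = pvH (cs ++ [c]) := by
        rw [pvH_append, pv_add_sub_max]
      simp only [pvStep]
      refine ⟨_, _, rfl, ?_, ?_⟩
      · apply List.ext_getElem
        · simp only [List.length_map, List.length_mapIdx, List.length_append,
            List.length_range, List.length_replicate, hRlen]
          exact hadd
        · intro i h1 h2
          have hi' : i < pvH (cs ++ [c]) := by simpa using h2
          have hiu : i < pvH cs + (c.length - pvH cs) := by omega
          simp only [List.getElem_map, List.getElem_mapIdx, List.getElem_range,
            List.flatten_append, List.flatten_cons, List.flatten_nil,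
            List.append_nil]
          have hrows1 : ((R ++ List.replicate (c.length - R.length) Bl)[i]'(by
                simp only [List.length_append, List.length_replicate, hRlen]
                omega)).flatten = pvRow joiner cs i := by
            by_cases hi : i < pvH cs
            · rw [List.getElem_append_left (by omega)]
              have : (R.map List.flatten)[i]'(by simp only [List.length_map]; omega)
                  = ((List.range (pvH cs)).map (pvRow joiner cs))[i]'(by simpa using hi) := by
                simp only [hR]
              simpa using this
            · rw [List.getElem_append_right (by omega)]
              rw [List.getElem_replicate, hBl, pvRow_ge_H _ _ _ (by omega)]
          rw [hrows1, pvRow_append _ _ _ _ hcs, List.append_assoc]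
          congr 2
          by_cases hi : i < c.length <;> simp [pvCell, hi, pvLjust, pvW]
      · rw [List.flatten_append, List.flatten_cons, List.flatten_nil,
          List.append_nil, hBl]
        show pvBlank joiner cs ++ (joiner ++ _) = _
        unfold pvBlank
        rw [List.map_append, List.map_singleton,
          pv_join_append _ _ _ (by simpa using hcs)]
        simp [pvW]

-- ===== VERDICT (by name: the statement is the Claim_ definition above) =====
theorem join_horizontal_py_spec : Claim_equal_join_horizontal_py := by
  intro blocks sep _
  unfold Spec_join_horizontal_py join_horizontal_py join_horizontal_py_alt
  by_cases hb : blocks.isEmpty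
  · simp [hb]
  · simp only [hb, Bool.false_eq_true, if_false]
    set cols := blocks.map (fun b => PySem.Chars.splitOn b.toList ['\n']) with hcols
    set joiner := if sep.toList = [] then [' '] else ' ' :: (sep.toList ++ [' ']) with hjoiner
    have hcne : cols ≠ [] := by
      simp only [hcols, ne_eq, List.map_eq_nil_iff]
      intro hnil
      rw [hnil] at hb; exact hb rfl
    have hfold : (List.foldl (fun st b => pvStep joiner st
        (PySem.Chars.splitOn b.toList ['\n'])) (none, []) blocks)
        = cols.foldl (pvStep joiner) (none, []) := List.foldl_map.symm
    obtain ⟨R, Bl, heq, hR, _⟩ := pvFold_inv joiner cols hcne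
    rw [hfold, heq]
    simp only [Option.getD_some]
    rw [hR]
    simp only [pvH]
    congr 1
    congr 1
    apply List.map_congr_left
    intro i hi
    have hiH : i < pvH cols := by simpa [pvH] using List.mem_range.mp hi
    unfold pvRow
    congr 1
    rw [pv_zip_map_self, List.map_map, List.map_map]
    apply List.map_congr_left
    intro ls hls
    simp only [Function.comp_apply]
    rw [List.getD_eq_getElem?_getD, List.getElem?_map,
      List.getElem?_range (by simpa [pvH] using hiH)]
    simp [pvCell, pvW]
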